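-- pv_equiv track=rewrite | github.com/Jia-520-only/NagaAgent-Custom-Modded-Version | NagaAgent_v5.0.0_20260222_223727/NagaAgent_v5.0.0_20260222_223727/Undefined/src/Undefined/bilibili/downloader.py | _select_quality
-- ===== SOURCE A (Python) =====
-- def _select_quality(available_qualities: list[int], prefer: int) -> int:
--     """选择最合适的清晰度。
--
--     优先选择 prefer；不可用时选最接近且不超过的；都超过则选最低。
--     """
--     if not available_qualities:
--         return prefer
--     if prefer in available_qualities:
--         return prefer
--     # 不超过 prefer 的最高清晰度
--     lower = [q for q in available_qualities if q <= prefer]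
--     if lower:
--         return max(lower)
--     # 所有都比 prefer 高，选最低
--     return min(available_qualities)
-- ===== SOURCE B (Python) =====
-- def _select_quality(available_qualities: list[int], prefer: int) -> int:
--     """Single linear scan: track the best quality <= prefer and the overall minimum."""
--     if not available_qualities:
--         return prefer
--     best_lower = None
--     overall_min = None
--     for q in available_qualities:
--         if q <= prefer:
--             best_lower = q if best_lower is None else max(best_lower, q)
--         overall_min = q if overall_min is None else min(overall_min, q)
--     return best_lower if best_lower is not None else overall_min
-- ===== Notes on version B (the rewrite author's own statement) =====
-- stated objective: alternative
-- what changed: Replaced A's membership test plus filter/max plus min (up to four traversals) by one linear scan maintaining the best quality not exceeding prefer and the running minimum.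
import Mathlib
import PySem

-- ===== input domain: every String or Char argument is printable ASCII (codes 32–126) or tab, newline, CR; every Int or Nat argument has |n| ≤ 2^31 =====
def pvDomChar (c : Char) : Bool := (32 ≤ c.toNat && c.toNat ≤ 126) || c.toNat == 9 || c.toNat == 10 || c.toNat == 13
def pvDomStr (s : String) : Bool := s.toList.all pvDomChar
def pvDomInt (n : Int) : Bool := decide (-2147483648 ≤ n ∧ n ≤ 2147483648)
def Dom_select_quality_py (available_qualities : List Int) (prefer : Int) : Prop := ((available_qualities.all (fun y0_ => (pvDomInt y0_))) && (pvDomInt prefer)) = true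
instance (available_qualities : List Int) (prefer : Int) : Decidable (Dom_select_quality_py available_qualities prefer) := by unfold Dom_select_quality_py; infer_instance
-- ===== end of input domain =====

-- B replaces A's membership test + filter/max + min (several passes) by one linear scan; objective: alternative.


-- ===== PORT A =====
def select_quality_py (available_qualities : List Int) (prefer : Int) : Int :=
  if available_qualities = [] then prefer
  else if available_qualities.contains prefer then prefer
  else
    let lower := available_qualities.filter (fun q => decide (q ≤ prefer))
    match lower with
    | y :: ys => ys.foldl max y          -- max(lower), Python's running-max loop
    | [] =>
      match available_qualities with
      | x :: t => t.foldl min x          -- min(available_qualities)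
      | [] => prefer                     -- unreachable: available_qualities ≠ []

-- ===== PORT B =====
-- one step of B's loop on best_lower
def pySelBL (prefer : Int) (o : Option Int) (q : Int) : Option Int :=
  if q ≤ prefer then some (match o with | none => q | some b => max b q) else o
-- one step of B's loop on overall_min
def pySelOM (o : Option Int) (q : Int) : Option Int :=
  some (match o with | none => q | some m => min m q)

def select_quality_py_alt (available_qualities : List Int) (prefer : Int) : Int :=
  if available_qualities = [] then prefer
  else
    let st := available_qualities.foldl
      (fun (st : Option Int × Option Int) q => (pySelBL prefer st.1 q, pySelOM st.2 q))
      (none, none)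
    match st.1 with
    | some b => b
    | none => st.2.getD prefer           -- overall_min (never none on nonempty input)

-- ===== PRECONDITION & SPEC =====
def Spec_select_quality_py (available_qualities : List Int) (prefer : Int) (out : Int) : Prop := out = select_quality_py_alt available_qualities prefer
instance (available_qualities : List Int) (prefer : Int) (out : Int) : Decidable (Spec_select_quality_py available_qualities prefer out) := by unfold Spec_select_quality_py; infer_instance

-- ===== CLAIM (what is proved, stated in full; the proofs are below) =====
def Claim_equal_select_quality_py : Prop := ∀ (available_qualities : List Int) (prefer : Int), Dom_select_quality_py available_qualities prefer → Spec_select_quality_py available_qualities prefer (select_quality_py available_qualities prefer)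

-- ===== LEMMAS AND PROOFS =====

-- the pair fold splits into two independent folds
theorem foldl_pair_split (p : Int) (t : List Int) (bl om : Option Int) :
    t.foldl (fun (st : Option Int × Option Int) q => (pySelBL p st.1 q, pySelOM st.2 q)) (bl, om)
      = (t.foldl (pySelBL p) bl, t.foldl pySelOM om) := by
  induction t generalizing bl om with
  | nil => rfl
  | cons q t ih => simp [List.foldl_cons, ih]

theorem foldl_om_some (t : List Int) (m : Int) :
    t.foldl pySelOM (some m) = some (t.foldl min m) := by
  induction t generalizing m with
  | nil => rfl
  | cons q t ih => simp [List.foldl_cons, pySelOM, ih]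

theorem foldl_bl_some (p : Int) (t : List Int) (b : Int) :
    t.foldl (pySelBL p) (some b) = some ((t.filter (fun q => decide (q ≤ p))).foldl max b) := by
  induction t generalizing b with
  | nil => rfl
  | cons q t ih =>
    by_cases h : q ≤ p
    · simp [List.foldl_cons, pySelBL, h, List.filter_cons, ih]
    · simp [List.foldl_cons, pySelBL, h, List.filter_cons, ih]

theorem foldl_bl_none (p : Int) (t : List Int) :
    t.foldl (pySelBL p) none
      = match t.filter (fun q => decide (q ≤ p)) with
        | [] => none
        | y :: ys => some (ys.foldl max y) := by
  induction t with
  | nil => rfl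
  | cons q t ih =>
    by_cases h : q ≤ p
    · simp [List.foldl_cons, pySelBL, h, List.filter_cons, foldl_bl_some]
    · simp [List.foldl_cons, pySelBL, h, List.filter_cons, ih]

theorem le_foldl_max (ys : List Int) (y : Int) :
    y ≤ ys.foldl max y ∧ ∀ z ∈ ys, z ≤ ys.foldl max y := by
  induction ys generalizing y with
  | nil => simp
  | cons a t ih =>
    rcases ih (max y a) with ⟨h1, h2⟩
    refine ⟨le_trans (le_max_left y a) h1, ?_⟩
    intro z hz
    rcases List.mem_cons.mp hz with hz | hz
    · rw [hz]; exact le_trans (le_max_right y a) h1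
    · exact h2 z hz

theorem foldl_max_mem (ys : List Int) (y : Int) :
    ys.foldl max y = y ∨ ys.foldl max y ∈ ys := by
  induction ys generalizing y with
  | nil => simp
  | cons a t ih =>
    rcases ih (max y a) with h | h
    · rcases max_choice y a with hm | hm
      · left; rw [List.foldl_cons, h, hm]
      · right; rw [List.foldl_cons, h, hm]; exact List.mem_cons_self
    · right; exact List.mem_cons_of_mem _ h

-- if prefer occurs in the list, the max of the ≤-prefer filter is prefer itself
theorem max_filter_eq_prefer (aq : List Int) (p : Int) (hmem : p ∈ aq)
    (y : Int) (ys : List Int)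
    (hf : aq.filter (fun q => decide (q ≤ p)) = y :: ys) :
    ys.foldl max y = p := by
  have hpf : p ∈ aq.filter (fun q => decide (q ≤ p)) := by
    simp [List.mem_filter, hmem]
  rw [hf] at hpf
  have hub : ∀ z ∈ (y :: ys), z ≤ ys.foldl max y := by
    intro z hz
    rcases List.mem_cons.mp hz with hz | hz
    · rw [hz]; exact (le_foldl_max ys y).1
    · exact (le_foldl_max ys y).2 z hz
  have hlep : ys.foldl max y ≤ p := by
    have hmem' : ys.foldl max y ∈ (y :: ys) := by
      rcases foldl_max_mem ys y with h | h
      · rw [h]; exact List.mem_cons_self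
      · exact List.mem_cons_of_mem _ h
    have := hmem'
    rw [← hf] at this
    have := List.of_mem_filter this
    simpa using this
  exact le_antisymm hlep (hub p hpf)

-- ===== VERDICT (by name: the statement is the Claim_ definition above) =====
theorem select_quality_py_spec : Claim_equal_select_quality_py := by
  intro aq p _
  unfold Spec_select_quality_py select_quality_py select_quality_py_alt
  by_cases hnil : aq = []
  · simp [hnil]
  · simp only [hnil, if_false]
    obtain ⟨x, t, rfl⟩ := List.exists_cons_of_ne_nil hnil
    rw [foldl_pair_split]
    have hbl := foldl_bl_none p (x :: t)
    have hom : (x :: t).foldl pySelOM none = some (t.foldl min x) := by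
      rw [List.foldl_cons]; exact foldl_om_some t x
    rcases hfe : (x :: t).filter (fun q => decide (q ≤ p)) with _ | ⟨y, ys⟩
    · -- no element ≤ p : prefer not in list, B returns overall min
      have hnm : ¬ (x :: t).contains p := by
        intro hc
        have hpm : p ∈ (x :: t) := by simpa using hc
        have : p ∈ (x :: t).filter (fun q => decide (q ≤ p)) := by
          simp [List.mem_filter, hpm]
        rw [hfe] at this; exact absurd this (List.not_mem_nil)
      rw [hfe] at hbl
      simp [hbl, hom]
      intro h
      exact absurd (List.mem_cons.mpr h) (by simpa using hnm)
    · rw [hfe] at hbl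
      by_cases hc : (x :: t).contains p
      · have hpm : p ∈ (x :: t) := by simpa using hc
        have := max_filter_eq_prefer (x :: t) p hpm y ys hfe
        simp [hc, hbl, this]
      · simp [hbl]
        intro h
        exact absurd (List.mem_cons.mpr h) (by simpa using hc)
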